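-- pv_equiv track=rewrite | github.com/dex-guru/ethereum-etl | ethereumetl/streaming/clickhouse_eth_streamer_adapter.py | get_logs_count_from_transactions
-- ===== SOURCE A (Python) =====
-- def get_logs_count_from_transactions(transactions: tuple) -> int:
--     none_value_receipt_logs_count = any(
--         d.get('receipt_logs_count') is None for d in transactions
--     )
--     if none_value_receipt_logs_count:
--         return -1
--     want_logs_count = sum(b['receipt_logs_count'] for b in transactions)
--     return want_logs_count
-- ===== SOURCE B (Python) =====
-- def get_logs_count_from_transactions(transactions: tuple) -> int:
--     total = 0
--     for d in transactions:
--         v = d.get('receipt_logs_count')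
--         if v is None:
--             return -1
--         total += v
--     return total
-- ===== Notes on version B (the rewrite author's own statement) =====
-- stated objective: simpler
-- what changed: Replaces A's two independent generator passes (any() missing-key detection, then sum()) with a single early-exit loop maintaining a running total.
import Mathlib
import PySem

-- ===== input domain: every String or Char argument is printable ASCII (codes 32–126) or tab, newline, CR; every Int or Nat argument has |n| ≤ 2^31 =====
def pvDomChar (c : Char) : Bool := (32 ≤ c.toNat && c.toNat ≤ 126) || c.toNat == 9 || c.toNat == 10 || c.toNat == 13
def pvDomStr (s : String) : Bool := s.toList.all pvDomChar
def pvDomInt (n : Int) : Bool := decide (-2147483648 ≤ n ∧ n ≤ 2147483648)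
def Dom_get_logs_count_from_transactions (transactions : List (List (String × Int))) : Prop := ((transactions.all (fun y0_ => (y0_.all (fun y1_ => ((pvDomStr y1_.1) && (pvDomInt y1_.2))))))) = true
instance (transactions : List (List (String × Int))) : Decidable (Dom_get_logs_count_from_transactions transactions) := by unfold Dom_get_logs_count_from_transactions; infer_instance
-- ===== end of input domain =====

-- ===== PORT A =====
-- B fuses A's two passes (any() + sum()) into one early-exit accumulating loop; same return value.
def get_logs_count_from_transactions (transactions : List (List (String × Int))) : Int :=
  -- any(d.get('receipt_logs_count') is None for d in transactions)
  if transactions.any (fun d => (PySem.Dict.get? (PySem.Dict.mk d) "receipt_logs_count").isNone) then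
    -1
  else
    -- sum(b['receipt_logs_count'] for b in transactions); no key is missing in this branch
    transactions.foldl (fun acc b => acc + (PySem.Dict.get? (PySem.Dict.mk b) "receipt_logs_count").getD 0) 0

-- ===== PORT B =====
def altGo : List (List (String × Int)) → Int → Int
  | [], total => total
  | d :: rest, total =>
    match PySem.Dict.get? (PySem.Dict.mk d) "receipt_logs_count" with
    | none => -1
    | some v => altGo rest (total + v)

def get_logs_count_from_transactions_alt (transactions : List (List (String × Int))) : Int :=
  altGo transactions 0

-- ===== PRECONDITION & SPEC =====
def Spec_get_logs_count_from_transactions (transactions : List (List (String × Int))) (out : Int) : Prop := out = get_logs_count_from_transactions_alt transactions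
instance (transactions : List (List (String × Int))) (out : Int) : Decidable (Spec_get_logs_count_from_transactions transactions out) := by unfold Spec_get_logs_count_from_transactions; infer_instance

-- ===== CLAIM (what is proved, stated in full; the proofs are below) =====
def Claim_equal_get_logs_count_from_transactions : Prop := ∀ (transactions : List (List (String × Int))), Dom_get_logs_count_from_transactions transactions → Spec_get_logs_count_from_transactions transactions (get_logs_count_from_transactions transactions)

-- ===== LEMMAS AND PROOFS =====
theorem altGo_eq (ts : List (List (String × Int))) (acc : Int) :
    altGo ts acc =
      if ts.any (fun d => (PySem.Dict.get? (PySem.Dict.mk d) "receipt_logs_count").isNone) then -1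
      else ts.foldl (fun a b => a + (PySem.Dict.get? (PySem.Dict.mk b) "receipt_logs_count").getD 0) acc := by
  induction ts generalizing acc with
  | nil => simp [altGo]
  | cons d rest ih =>
    simp only [altGo, List.any_cons, List.foldl_cons]
    cases h : PySem.Dict.get? (PySem.Dict.mk d) "receipt_logs_count" with
    | none => simp [h]
    | some v => simp [h, ih]

-- ===== VERDICT (by name: the statement is the Claim_ definition above) =====
theorem get_logs_count_from_transactions_spec : Claim_equal_get_logs_count_from_transactions := by
  intro ts _
  unfold Spec_get_logs_count_from_transactions get_logs_count_from_transactions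
    get_logs_count_from_transactions_alt
  rw [altGo_eq]
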